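-- pv_equiv track=rewrite | github.com/YOM1I/Decision-Tree | decision_tree.py | na_dobrom_putu
-- ===== SOURCE A (Python) =====
-- def na_dobrom_putu(u, igrac_tabla):
--     for matrica in u:
--         pogodak = True
--         for i in range(4):
--             for j in range(4):
--                 if igrac_tabla[i][j] != 0 and matrica[i][j] != igrac_tabla[i][j]:
--                     pogodak = False
--                     break
--             if not pogodak:
--                 break
--         if pogodak:
--             return True
--     return False
-- ===== SOURCE B (Python) =====
-- def na_dobrom_putu(u, igrac_tabla):
--     # Transposed, cell-major pass: instead of rescanning the board per matrix,
--     # walk the 16 board cells once, maintaining the list of still-viable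
--     # candidate matrices; each nonzero cell filters the candidates, and we stop
--     # as soon as no candidate survives.
--     candidates = u
--     for i in range(4):
--         for j in range(4):
--             if not candidates:
--                 return False
--             v = igrac_tabla[i][j]
--             if v != 0:
--                 candidates = [m for m in candidates if m[i][j] == v]
--     return bool(candidates)
-- ===== Notes on version B (the rewrite author's own statement) =====
-- stated objective: alternative
-- what changed: B transposes the traversal: a single cell-major pass over the 16 board cells that maintains and filters the list of still-viable candidate matrices (stopping when it empties), instead of A's matrix-major loop that rescans the whole board for each matrix; Pre_ excludes inputs where A returns but B raises IndexError because B still filters matrices that come after A's early full match.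
import Mathlib
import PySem

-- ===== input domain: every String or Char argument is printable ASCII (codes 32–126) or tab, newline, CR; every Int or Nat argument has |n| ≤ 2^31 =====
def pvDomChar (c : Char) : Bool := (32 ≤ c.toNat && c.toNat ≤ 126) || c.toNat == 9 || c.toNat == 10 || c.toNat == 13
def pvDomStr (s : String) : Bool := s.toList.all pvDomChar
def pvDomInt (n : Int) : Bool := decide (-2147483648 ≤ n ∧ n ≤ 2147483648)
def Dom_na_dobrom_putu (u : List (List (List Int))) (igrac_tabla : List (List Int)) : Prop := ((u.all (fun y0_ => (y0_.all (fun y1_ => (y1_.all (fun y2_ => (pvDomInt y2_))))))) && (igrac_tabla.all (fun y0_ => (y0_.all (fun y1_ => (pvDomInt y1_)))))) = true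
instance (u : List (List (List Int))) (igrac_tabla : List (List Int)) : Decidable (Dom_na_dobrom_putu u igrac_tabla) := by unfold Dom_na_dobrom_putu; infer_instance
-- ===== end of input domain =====

-- B transposes the traversal: one cell-major pass over the board filtering a shrinking
-- candidate-matrix list, instead of A's matrix-major board rescan; objective: alternative.

-- xss[i][j]; exact (agrees with Python) whenever both indexes are in range, which Pre_ guarantees
def pvGet2 (xss : List (List Int)) (i j : Int) : Int :=
  PySem.List.pyGetD (PySem.List.pyGetD xss i []) j 0

-- ===== PORT A =====
-- the if-condition of A's innermost loop
def pvACond (matrica igrac_tabla : List (List Int)) (i j : Int) : Bool :=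
  pvGet2 igrac_tabla i j != 0 && pvGet2 matrica i j != pvGet2 igrac_tabla i j

-- 'for j in range(4)' with the break: once pogodak is false the body no longer runs
def pvAInner (matrica igrac_tabla : List (List Int)) (i : Int) : Bool :=
  (PySem.List.pyRange 0 4 1).foldl
    (fun pogodak j => if pogodak then !pvACond matrica igrac_tabla i j else pogodak) true

-- 'for i in range(4)' with the 'if not pogodak: break'
def pvAOuter (matrica igrac_tabla : List (List Int)) : Bool :=
  (PySem.List.pyRange 0 4 1).foldl
    (fun pogodak i => if pogodak then pvAInner matrica igrac_tabla i else pogodak) true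

def na_dobrom_putu (u : List (List (List Int))) (igrac_tabla : List (List Int)) : Bool :=
  match u with
  | [] => false
  | matrica :: rest =>
      if pvAOuter matrica igrac_tabla then true else na_dobrom_putu rest igrac_tabla

-- ===== PORT B =====
-- body of B's cell (i, j): 'if not candidates: return False' (none = the early return has
-- fired), then filter the candidates when the board cell is nonzero
def pvBBody (igrac_tabla : List (List Int))
    (st : Option (List (List (List Int)))) (i j : Int) : Option (List (List (List Int))) :=
  match st with
  | none => none
  | some cands =>
      if cands.isEmpty then none
      else
        let v := pvGet2 igrac_tabla i j
        if v != 0 then some (cands.filter (fun m => pvGet2 m i j == v)) else some cands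

def na_dobrom_putu_alt (u : List (List (List Int))) (igrac_tabla : List (List Int)) : Bool :=
  match (PySem.List.pyRange 0 4 1).foldl (fun st i =>
          (PySem.List.pyRange 0 4 1).foldl (fun st j => pvBBody igrac_tabla st i j) st)
          (some u) with
  | none => false
  | some cands => !cands.isEmpty   -- 'return bool(candidates)'

-- ===== PRECONDITION & SPEC =====
-- board cell k (k = 0..15 in reading order, row k/4, column k%4) is in range
def pvBOk (t : List (List Int)) (k : Nat) : Bool :=
  decide (k / 4 < t.length) && decide (k % 4 < (t.getD (k / 4) []).length)
-- cell k of x (Nat indexes, default 0)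
def pvCell (x : List (List Int)) (k : Nat) : Int := (x.getD (k / 4) []).getD (k % 4) 0
-- cell k of matrix m is in range
def pvCOk (m : List (List Int)) (k : Nat) : Bool :=
  decide (k / 4 < m.length) && decide (k % 4 < (m.getD (k / 4) []).length)
-- matrix m is still a candidate when cell k is reached: every earlier board cell was readable
-- and was either zero or matched in range by m
def pvAlive (m t : List (List Int)) (k : Nat) : Bool :=
  (List.range k).all (fun q =>
    pvBOk t q && (pvCell t q == 0 || (pvCOk m q && pvCell m q == pvCell t q)))

-- Pre_ is exactly 'B returns': whenever some matrix is still a candidate at cell k, the board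
-- cell is readable and, if nonzero, every still-candidate matrix has cell k in range. It
-- excludes inputs where A returns but B raises IndexError — B still filters matrices that come
-- after A's early full match (see claim.json cites); every input where B returns is one where
-- A returns too, since A reads a subset of the same cells.
def Pre_na_dobrom_putu (u : List (List (List Int))) (igrac_tabla : List (List Int)) : Prop :=
  ∀ k < 16, (∃ m ∈ u, pvAlive m igrac_tabla k = true) →
    pvBOk igrac_tabla k = true ∧
      (pvCell igrac_tabla k = 0 ∨
        ∀ m ∈ u, pvAlive m igrac_tabla k = true → pvCOk m k = true)

instance (u : List (List (List Int))) (igrac_tabla : List (List Int)) : Decidable (Pre_na_dobrom_putu u igrac_tabla) := by unfold Pre_na_dobrom_putu; infer_instance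

def pvWitness_na_dobrom_putu : List (List (List Int)) × List (List Int) :=
  ([[[1,0,0,0],[0,0,0,0],[0,0,0,0],[0,0,0,0]]],
   [[1,0,0,0],[0,2,0,0],[0,0,0,0],[0,0,0,0]])

def Spec_na_dobrom_putu (u : List (List (List Int))) (igrac_tabla : List (List Int)) (out : Bool) : Prop := out = na_dobrom_putu_alt u igrac_tabla
instance (u : List (List (List Int))) (igrac_tabla : List (List Int)) (out : Bool) : Decidable (Spec_na_dobrom_putu u igrac_tabla out) := by unfold Spec_na_dobrom_putu; infer_instance

-- ===== CLAIM (what is proved, stated in full; the proofs are below) =====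
def Claim_equal_na_dobrom_putu : Prop := ∀ (u : List (List (List Int))) (igrac_tabla : List (List Int)), Dom_na_dobrom_putu u igrac_tabla → Pre_na_dobrom_putu u igrac_tabla → Spec_na_dobrom_putu u igrac_tabla (na_dobrom_putu u igrac_tabla)

-- ===== LEMMAS AND PROOFS =====

-- a foldl that only runs its body while the flag is up computes 'all'
theorem pvBreakFoldl {α : Type} (f : α → Bool) :
    ∀ (l : List α) (b : Bool),
      l.foldl (fun pog x => if pog then f x else pog) b = (b && l.all f) := by
  intro l
  induction l with
  | nil => intro b; cases b <;> simp
  | cons x xs ih => intro b; cases b <;> simp [List.foldl_cons, ih]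

-- A's per-matrix scan is 'every cell passes'
theorem pvAOuter_eq (m t : List (List Int)) :
    pvAOuter m t =
      (PySem.List.pyRange 0 4 1).all (fun i =>
        (PySem.List.pyRange 0 4 1).all (fun j => !pvACond m t i j)) := by
  unfold pvAOuter pvAInner
  rw [pvBreakFoldl]
  simp only [Bool.true_and]
  congr 1
  funext i
  rw [pvBreakFoldl]
  simp

-- the constraint check at one cell, as a predicate on a matrix
def pvChk (t : List (List Int)) (p : Int × Int) (m : List (List Int)) : Bool :=
  !(pvGet2 t p.1 p.2 != 0) || pvGet2 m p.1 p.2 == pvGet2 t p.1 p.2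

-- interpretation of B's loop state as the final answer it will produce from here with no
-- constraints left
def pvInterp (st : Option (List (List (List Int)))) : Bool :=
  match st with
  | none => false
  | some cands => !cands.isEmpty

-- B's fold over an explicit list of cell coordinates
def pvFoldPairs (t : List (List Int)) (ps : List (Int × Int))
    (st : Option (List (List (List Int)))) : Option (List (List (List Int))) :=
  ps.foldl (fun st p => pvBBody t st p.1 p.2) st

theorem pvFoldPairs_none (t : List (List Int)) (ps : List (Int × Int)) :
    pvFoldPairs t ps none = none := by
  induction ps with
  | nil => rfl
  | cons p ps ih => simpa [pvFoldPairs, pvBBody] using ih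

-- the loop invariant: running B's body over cells ps answers 'does a candidate satisfy every
-- constraint among ps'
theorem pvFoldPairs_eq (t : List (List Int)) :
    ∀ (ps : List (Int × Int)) (cands : List (List (List Int))),
      pvInterp (pvFoldPairs t ps (some cands)) = cands.any (fun m => ps.all (pvChk t · m)) := by
  intro ps
  induction ps with
  | nil =>
      intro cands
      cases cands <;> simp [pvFoldPairs, pvInterp]
  | cons p ps ih =>
      intro cands
      by_cases hemp : cands.isEmpty
      · have hc := List.isEmpty_iff.mp hemp
        subst hc
        rw [show pvFoldPairs t (p :: ps) (some []) = pvFoldPairs t ps none by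
            simp [pvFoldPairs, pvBBody]]
        rw [pvFoldPairs_none]
        simp [pvInterp]
      · have hbody : pvBBody t (some cands) p.1 p.2 =
            some (if pvGet2 t p.1 p.2 != 0
                  then cands.filter (fun m => pvGet2 m p.1 p.2 == pvGet2 t p.1 p.2)
                  else cands) := by
          simp only [pvBBody, if_neg hemp]
          split <;> simp_all
        rw [show pvFoldPairs t (p :: ps) (some cands)
              = pvFoldPairs t ps (pvBBody t (some cands) p.1 p.2) from rfl, hbody]
        cases hv : pvGet2 t p.1 p.2 != 0 with
        | false =>
            rw [if_neg Bool.false_ne_true, ih]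
            simp [pvChk, hv]
        | true =>
            rw [if_pos rfl, ih, List.any_filter]
            simp [pvChk, hv]

-- the full 16-cell coordinate list, and B rewritten over it
def pvPairs : List (Int × Int) :=
  (PySem.List.pyRange 0 4 1).flatMap (fun i => (PySem.List.pyRange 0 4 1).map (fun j => (i, j)))

theorem pvAlt_eq (u : List (List (List Int))) (t : List (List Int)) :
    na_dobrom_putu_alt u t = u.any (fun m => pvPairs.all (pvChk t · m)) := by
  have hfold : (PySem.List.pyRange 0 4 1).foldl (fun st i =>
          (PySem.List.pyRange 0 4 1).foldl (fun st j => pvBBody t st i j) st)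
          (some u) = pvFoldPairs t pvPairs (some u) := by
    unfold pvFoldPairs pvPairs
    rw [List.foldl_flatMap]
    simp only [List.foldl_map]
  unfold na_dobrom_putu_alt
  rw [hfold, ← pvFoldPairs_eq t pvPairs u]
  cases pvFoldPairs t pvPairs (some u) <;> rfl

-- per matrix, A's scan and B's 16-constraint check agree
theorem pvPerMatrix (m t : List (List Int)) :
    pvAOuter m t = pvPairs.all (pvChk t · m) := by
  rw [pvAOuter_eq]
  unfold pvPairs
  rw [List.all_flatMap]
  congr 1
  funext i
  rw [List.all_map]
  congr 1
  funext j
  unfold pvChk pvACond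
  cases h1 : pvGet2 t i j != 0 <;> cases h2 : pvGet2 m i j == pvGet2 t i j <;>
    simp_all [bne]

-- the two ports agree on every input (raising behaviour is Pre_'s business, not the ports')
theorem pvMain (u : List (List (List Int))) (igrac_tabla : List (List Int)) :
    na_dobrom_putu u igrac_tabla = na_dobrom_putu_alt u igrac_tabla := by
  rw [pvAlt_eq]
  induction u with
  | nil => simp [na_dobrom_putu]
  | cons m rest ih =>
      simp only [na_dobrom_putu, List.any_cons]
      rw [pvPerMatrix] at *
      cases h : pvPairs.all (pvChk igrac_tabla · m) <;> simp [ih]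

-- ===== VERDICT (by name: the statement is the Claim_ definition above) =====
theorem na_dobrom_putu_spec : Claim_equal_na_dobrom_putu := by
  intro u igrac_tabla _ _
  exact pvMain u igrac_tabla
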